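-- pv_equiv track=rewrite | github.com/pypi-data/pypi-mirror-403 | packages/seabirdfilehandler/seabirdfilehandler-0.13.1.tar.gz/seabirdfilehandler-0.13.1/src/seabirdfilehandler/hexdecoder.py | sorting_parameters
-- ===== SOURCE A (Python) =====
-- def sorting_parameters(
--     sensor_info: list,
--     rule: list = [
--         "Pressure",
--         "Temperature",
--         "Temperature2",
--         "Conductivity",
--         "Conductivity2",
--     ],
-- ) -> list:
--     out_list = []
--     for name in rule:
--         for param in sensor_info:
--             if name == param["SensorName"]:
--                 out_list.append(param)
--
--     for param in sensor_info:
--         if param["SensorName"] not in rule: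
--             out_list.append(param)
--
--     return out_list
-- ===== SOURCE B (Python) =====
-- def sorting_parameters(
--     sensor_info: list,
--     rule: list = [
--         "Pressure",
--         "Temperature",
--         "Temperature2",
--         "Conductivity",
--         "Conductivity2",
--     ],
-- ) -> list:
--     return sorted(
--         sensor_info,
--         key=lambda p: rule.index(p["SensorName"])
--         if p["SensorName"] in rule
--         else len(rule),
--     )
-- ===== Notes on version B (the rewrite author's own statement) =====
-- stated objective: idiomatic
-- what changed: Replaced the per-rule-name scans over sensor_info plus a final membership pass by a single stable sort keyed on each parameter's rank in the rule list (non-rule names get rank len(rule)).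
import Mathlib
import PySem

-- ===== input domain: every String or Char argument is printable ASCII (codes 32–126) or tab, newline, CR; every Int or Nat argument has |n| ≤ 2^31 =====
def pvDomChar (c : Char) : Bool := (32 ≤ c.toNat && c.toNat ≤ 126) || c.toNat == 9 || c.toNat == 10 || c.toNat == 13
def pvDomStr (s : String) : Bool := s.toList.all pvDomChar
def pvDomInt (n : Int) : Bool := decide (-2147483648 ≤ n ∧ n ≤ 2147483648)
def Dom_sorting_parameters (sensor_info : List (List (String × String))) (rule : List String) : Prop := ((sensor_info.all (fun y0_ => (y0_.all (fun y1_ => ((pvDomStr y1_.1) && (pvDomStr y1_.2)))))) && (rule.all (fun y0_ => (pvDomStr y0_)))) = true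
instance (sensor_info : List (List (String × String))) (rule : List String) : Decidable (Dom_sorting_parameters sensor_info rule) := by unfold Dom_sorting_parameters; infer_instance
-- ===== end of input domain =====

-- B replaces A's per-rule-name scans plus membership pass by one stable sort on the rule-index rank (idiomatic rewrite, same return value).

-- shared helper: param["SensorName"] (both Pythons read the dict identically)
def pvSName (p : List (String × String)) : String :=
  PySem.Dict.getD (PySem.Dict.mk p) "SensorName" ""

-- ===== PORT A =====
def sorting_parameters (sensor_info : List (List (String × String))) (rule : List String) : List (List (String × String)) :=
  let out1 := rule.foldl (fun acc name =>
    sensor_info.foldl (fun acc param =>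
      if name == pvSName param then acc ++ [param] else acc) acc) []
  sensor_info.foldl (fun acc param =>
    if rule.contains (pvSName param) then acc else acc ++ [param]) out1

-- ===== PORT B =====
-- sorted(sensor_info, key=lambda p: rule.index(p["SensorName"]) if p["SensorName"] in rule else len(rule))
def pvRank (rule : List String) (p : List (String × String)) : Nat :=
  if rule.contains (pvSName p) then (PySem.List.index? rule (pvSName p)).getD 0 else rule.length

def sorting_parameters_alt (sensor_info : List (List (String × String))) (rule : List String) : List (List (String × String)) :=
  PySem.List.sorted sensor_info (pvRank rule) false

-- ===== PRECONDITION & SPEC =====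
-- Pre_ excludes params without a "SensorName" key (A raises KeyError there) and rules with
-- duplicate entries, on which A's per-name scans append a matching param once per duplicate
-- occurrence — an accident of the repeated scan.
def Pre_sorting_parameters (sensor_info : List (List (String × String))) (rule : List String) : Prop :=
  (∀ p ∈ sensor_info, (PySem.Dict.mk p).contains "SensorName" = true) ∧ rule.Nodup
instance (sensor_info : List (List (String × String))) (rule : List String) : Decidable (Pre_sorting_parameters sensor_info rule) := by unfold Pre_sorting_parameters; infer_instance

def pvWitness_sorting_parameters : (List (List (String × String))) × List String :=
  ([[("SensorName", "Temperature")], [("SensorName", "Foo")], [("SensorName", "Pressure")]],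
   ["Pressure", "Temperature"])

def Spec_sorting_parameters (sensor_info : List (List (String × String))) (rule : List String) (out : List (List (String × String))) : Prop := out = sorting_parameters_alt sensor_info rule
instance (sensor_info : List (List (String × String))) (rule : List String) (out : List (List (String × String))) : Decidable (Spec_sorting_parameters sensor_info rule out) := by unfold Spec_sorting_parameters; infer_instance

-- ===== CLAIM (what is proved, stated in full; the proofs are below) =====
def Claim_equal_sorting_parameters : Prop := ∀ (sensor_info : List (List (String × String))) (rule : List String), Dom_sorting_parameters sensor_info rule → Pre_sorting_parameters sensor_info rule → Spec_sorting_parameters sensor_info rule (sorting_parameters sensor_info rule)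

-- ===== LEMMAS AND PROOFS =====

-- canonical rank: first index of the name in rule, or rule.length if absent
def pvKey (rule : List String) (p : List (String × String)) : Nat :=
  (PySem.List.index? rule (pvSName p)).getD rule.length

-- bucket concatenation: elements of xs grouped by rank, in the order of l
def pvBuckets {α : Type} (key : α → Nat) (l : List Nat) (xs : List α) : List α :=
  l.flatMap (fun i => xs.filter (fun x => key x == i))

lemma pvRank_eq_pvKey (rule : List String) : pvRank rule = pvKey rule := by
  funext p
  unfold pvRank pvKey
  by_cases h : pvSName p ∈ rule
  · have hs : (PySem.List.index? rule (pvSName p)).isSome := (PySem.List.index?_isSome_iff _ _).mpr h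
    rcases Option.isSome_iff_exists.mp hs with ⟨k, hk⟩
    rw [hk]
    simp [h]
  · have hn : PySem.List.index? rule (pvSName p) = none := (PySem.List.index?_eq_none_iff _ _).mpr h
    rw [hn]
    simp [h]

lemma pvKey_lt_of_mem (rule : List String) (p : List (String × String))
    (h : pvSName p ∈ rule) : pvKey rule p < rule.length := by
  unfold pvKey
  have hs : (PySem.List.index? rule (pvSName p)).isSome := (PySem.List.index?_isSome_iff _ _).mpr h
  rcases Option.isSome_iff_exists.mp hs with ⟨k, hk⟩
  rcases PySem.List.getElem_of_index?_eq_some hk with ⟨hklt, _, _⟩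
  rw [hk]
  simpa using hklt

lemma pvKey_eq_len_iff (rule : List String) (p : List (String × String)) :
    pvKey rule p = rule.length ↔ pvSName p ∉ rule := by
  constructor
  · intro h hmem
    exact absurd h (Nat.ne_of_lt (pvKey_lt_of_mem rule p hmem))
  · intro h
    unfold pvKey
    rw [(PySem.List.index?_eq_none_iff _ _).mpr h]
    rfl

lemma pvKey_le (rule : List String) (p : List (String × String)) : pvKey rule p ≤ rule.length := by
  by_cases h : pvSName p ∈ rule
  · exact Nat.le_of_lt (pvKey_lt_of_mem rule p h)
  · exact Nat.le_of_eq ((pvKey_eq_len_iff rule p).mpr h)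

lemma pvKey_cons (r : String) (rs : List String) (p : List (String × String)) :
    pvKey (r :: rs) p = if pvSName p = r then 0 else pvKey rs p + 1 := by
  unfold pvKey
  by_cases h : pvSName p = r
  · subst h
    rw [PySem.List.index?_cons_self]
    simp
  · rw [PySem.List.index?_cons_of_ne rs (Ne.symm h)]
    cases hx : PySem.List.index? rs (pvSName p) <;> simp [h]

lemma pvInsert_mid {α : Type} (key : α → Nat) (x : α) (A B : List α)
    (hA : ∀ a ∈ A, key a ≤ key x) (hB : ∀ b ∈ B, key x < key b) :
    PySem.List.insertBy (fun a b => decide (key a < key b)) x (A ++ B) = A ++ x :: B := by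
  induction A with
  | nil =>
    cases B with
    | nil => simp [PySem.List.insertBy]
    | cons b bs => simp [PySem.List.insertBy, hB b (by simp)]
  | cons a A ih =>
    have hax : ¬ key x < key a := Nat.not_lt.mpr (hA a (by simp))
    simp [PySem.List.insertBy, hax, ih (fun a ha => hA a (by simp [ha]))]

lemma pvBuckets_append {α : Type} (key : α → Nat) (l1 l2 : List Nat) (xs : List α) :
    pvBuckets key (l1 ++ l2) xs = pvBuckets key l1 xs ++ pvBuckets key l2 xs := by
  unfold pvBuckets; simp

lemma pvBuckets_key_mem {α : Type} (key : α → Nat) (l : List Nat) (xs : List α) (y : α)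
    (hy : y ∈ pvBuckets key l xs) : key y ∈ l := by
  unfold pvBuckets at hy
  rcases List.mem_flatMap.mp hy with ⟨i, hi, hmem⟩
  rcases List.mem_filter.mp hmem with ⟨_, hk⟩
  simpa [eq_of_beq hk] using hi

lemma pvBuckets_snoc_absent {α : Type} (key : α → Nat) (l : List Nat) (xs : List α) (x : α)
    (hx : key x ∉ l) :
    pvBuckets key l (xs ++ [x]) = pvBuckets key l xs := by
  unfold pvBuckets
  refine List.flatMap_congr (fun i hi => ?_)
  rw [List.filter_append]
  have : (key x == i) = false := by
    by_cases h : key x = i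
    · exact absurd (h ▸ hi) hx
    · simp [h]
  simp [this]

lemma pvSorted_eq_buckets {α : Type} (key : α → Nat) (N : ℕ) (xs : List α)
    (hle : ∀ x ∈ xs, key x ≤ N) :
    PySem.List.sorted xs key false = pvBuckets key (List.range (N + 1)) xs := by
  induction xs using List.reverseRecOn with
  | nil => simp [PySem.List.sorted, pvBuckets]
  | append_singleton xs x ih =>
    have hx : key x ≤ N := hle x (by simp)
    have hxs : ∀ y ∈ xs, key y ≤ N := fun y hy => hle y (by simp [hy])
    rw [PySem.List.sorted_eq_foldl_insertBy, List.foldl_append,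
        ← PySem.List.sorted_eq_foldl_insertBy, ih hxs]
    simp only [List.foldl_cons, List.foldl_nil]
    have hsplit : List.range (N + 1)
        = (List.range (key x) ++ [key x]) ++ (List.range (N - key x)).map (fun i => (key x + 1) + i) := by
      have h1 : N + 1 = (key x + 1) + (N - key x) := by omega
      rw [h1, List.range_add, List.range_succ]
    rw [hsplit, pvBuckets_append, pvBuckets_append, pvBuckets_append, pvBuckets_append,
        pvBuckets_snoc_absent key (List.range (key x)) xs x (by simp),
        pvBuckets_snoc_absent key ((List.range (N - key x)).map (fun i => (key x + 1) + i)) xs x (by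
          intro hmem
          rcases List.mem_map.mp hmem with ⟨i, _, hi⟩
          omega)]
    have hlast : pvBuckets key [key x] (xs ++ [x]) = pvBuckets key [key x] xs ++ [x] := by
      unfold pvBuckets
      simp [List.filter_append]
    rw [hlast]
    have hA : ∀ a ∈ pvBuckets key (List.range (key x)) xs ++ pvBuckets key [key x] xs,
        key a ≤ key x := by
      intro a ha
      rcases List.mem_append.mp ha with h | h
      · have := List.mem_range.mp (pvBuckets_key_mem key _ xs a h)
        omega
      · have := pvBuckets_key_mem key _ xs a h
        simp at this
        omega
    have hB : ∀ b ∈ pvBuckets key ((List.range (N - key x)).map (fun i => (key x + 1) + i)) xs,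
        key x < key b := by
      intro b hb
      rcases List.mem_map.mp (pvBuckets_key_mem key _ xs b hb) with ⟨i, _, hi⟩
      omega
    rw [pvInsert_mid key x _ _ hA hB]
    simp

lemma pvFlatMap_rule (rule : List String) (hnd : rule.Nodup) (xs : List (List (String × String))) :
    rule.flatMap (fun name => xs.filter (fun p => name == pvSName p))
      = pvBuckets (pvKey rule) (List.range rule.length) xs := by
  induction rule with
  | nil => simp [pvBuckets]
  | cons r rs ih =>
    have hr : r ∉ rs := (List.nodup_cons.mp hnd).1
    have hnd' : rs.Nodup := (List.nodup_cons.mp hnd).2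
    rw [List.flatMap_cons, ih hnd']
    have hrange : List.range (r :: rs).length = 0 :: (List.range rs.length).map (· + 1) := by
      simp [List.range_succ_eq_map]
    rw [hrange]
    unfold pvBuckets
    rw [List.flatMap_cons, List.flatMap_map]
    congr 1
    · -- bucket 0 = the r-scan
      refine List.filter_congr (fun p _ => ?_)
      rw [pvKey_cons]
      by_cases h : pvSName p = r
      · simp [h]
      · have h2 : r ≠ pvSName p := fun he => h he.symm
        simp [h, h2]
    · -- buckets i+1 over rs
      refine List.flatMap_congr (fun i hi => ?_)
      refine List.filter_congr (fun p _ => ?_)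
      rw [pvKey_cons]
      by_cases h : pvSName p = r
      · -- sname = r, r ∉ rs, so pvKey rs p = rs.length ≠ i
        have hk : pvKey rs p = rs.length := (pvKey_eq_len_iff rs p).mpr (h ▸ hr)
        have : i < rs.length := List.mem_range.mp hi
        simp [h, hk]
        omega
      · simp [h]

lemma pvTrailing (rule : List String) (xs : List (List (String × String))) :
    xs.filter (fun p => !(rule.contains (pvSName p)))
      = xs.filter (fun p => pvKey rule p == rule.length) := by
  refine List.filter_congr (fun p _ => ?_)
  by_cases h : pvSName p ∈ rule
  · have := Nat.ne_of_lt (pvKey_lt_of_mem rule p h)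
    simp [h, this]
  · have := (pvKey_eq_len_iff rule p).mpr h
    simp [h, this]

lemma pvA_eq (rule : List String) (xs : List (List (String × String))) :
    sorting_parameters xs rule
      = rule.flatMap (fun name => xs.filter (fun p => name == pvSName p))
        ++ xs.filter (fun p => !(rule.contains (pvSName p))) := by
  have h1 : rule.foldl (fun acc name =>
        xs.foldl (fun acc param => if name == pvSName param then acc ++ [param] else acc) acc)
          ([] : List (List (String × String)))
      = rule.flatMap (fun name => xs.filter (fun p => name == pvSName p)) := by
    rw [PySem.List.foldl_congr_mem rule _
        (fun acc name => acc ++ xs.filter (fun p => name == pvSName p)) []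
        (fun acc name _ => PySem.List.foldl_append_if_eq_filter _ xs acc)]
    simpa using PySem.List.foldl_append_eq_flatMap
      (fun name => xs.filter (fun p => name == pvSName p)) rule []
  have h2 : ∀ init : List (List (String × String)),
      xs.foldl (fun acc param => if rule.contains (pvSName param) then acc else acc ++ [param]) init
        = init ++ xs.filter (fun p => !(rule.contains (pvSName p))) := by
    intro init
    rw [PySem.List.foldl_congr_mem xs _
        (fun acc p => if !(rule.contains (pvSName p)) then acc ++ [p] else acc) init
        (fun acc p _ => by cases h : rule.contains (pvSName p) <;> simp only [h, Bool.not_false, Bool.not_true, Bool.false_eq_true, if_true, if_false])]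
    exact PySem.List.foldl_append_if_eq_filter _ xs init
  show xs.foldl (fun acc param => if rule.contains (pvSName param) then acc else acc ++ [param])
      (rule.foldl (fun acc name =>
        xs.foldl (fun acc param => if name == pvSName param then acc ++ [param] else acc) acc) [])
    = _
  rw [h1, h2]

-- ===== VERDICT (by name: the statement is the Claim_ definition above) =====
theorem sorting_parameters_spec : Claim_equal_sorting_parameters := by
  intro si rule _ hpre
  unfold Spec_sorting_parameters sorting_parameters_alt
  rw [pvRank_eq_pvKey, pvSorted_eq_buckets (pvKey rule) rule.length si (fun x _ => pvKey_le rule x)]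
  rw [pvA_eq, pvFlatMap_rule rule hpre.2, pvTrailing, List.range_succ, pvBuckets_append]
  congr 1
  unfold pvBuckets
  simp
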